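-- pv_equiv track=rewrite | github.com/VlaTal1/decision_making_theory | lb6/utils.py | filter_votes
-- ===== SOURCE A (Python) =====
-- def filter_votes(voting_profile: dict[tuple, int], alternatives: list[str]) -> dict[tuple, int]:
--     filtered_voting_profile = {}
--
--     for vote, amount in voting_profile.items():
--         new_vote = []
--         for value in vote:
--             if value in alternatives:
--                 new_vote.append(value)
--
--         if tuple(new_vote) in filtered_voting_profile.keys():
--             filtered_voting_profile[tuple(new_vote)] += amount
--         else:
--             filtered_voting_profile[tuple(new_vote)] = amount
--
--     return filtered_voting_profile
-- ===== SOURCE B (Python) =====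
-- def filter_votes(voting_profile: dict[tuple, int], alternatives: list[str]) -> dict[tuple, int]:
--     allowed = set(alternatives)
--     pairs = [(tuple(v for v in vote if v in allowed), amount)
--              for vote, amount in voting_profile.items()]
--     keys = []
--     for key, _ in pairs:
--         if key not in keys:
--             keys.append(key)
--     return {key: sum(a for k, a in pairs if k == key) for key in keys}
-- ===== Notes on version B (the rewrite author's own statement) =====
-- stated objective: alternative
-- what changed: Replaces A's single-pass hash accumulation with a map-then-group-by decomposition: one pass builds the (filtered key, amount) pairs, the distinct keys are collected in first-occurrence order, and each output count is a per-key sum over the pair list.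
import Mathlib
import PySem

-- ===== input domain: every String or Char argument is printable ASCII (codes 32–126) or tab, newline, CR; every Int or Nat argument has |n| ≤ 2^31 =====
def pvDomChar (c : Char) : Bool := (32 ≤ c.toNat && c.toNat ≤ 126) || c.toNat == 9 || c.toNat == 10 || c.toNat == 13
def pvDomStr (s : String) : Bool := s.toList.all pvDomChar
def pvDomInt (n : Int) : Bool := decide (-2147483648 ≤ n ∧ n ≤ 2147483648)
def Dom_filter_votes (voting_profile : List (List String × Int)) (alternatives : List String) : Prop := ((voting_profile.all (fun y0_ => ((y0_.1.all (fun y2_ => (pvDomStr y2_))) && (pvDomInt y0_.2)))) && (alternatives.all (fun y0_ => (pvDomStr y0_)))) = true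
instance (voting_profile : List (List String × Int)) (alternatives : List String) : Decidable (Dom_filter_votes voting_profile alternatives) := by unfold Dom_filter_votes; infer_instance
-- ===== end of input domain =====

-- B changes the decomposition only (map, dedupe keys, per-key sums) — same results, similar cost.

-- ===== PORT A =====
def filter_votes (voting_profile : List (List String × Int)) (alternatives : List String) : List (List String × Int) :=
  (voting_profile.foldl (fun d p =>
      let new_vote := p.1.foldl (fun acc value => if alternatives.contains value then acc ++ [value] else acc) ([] : List String)
      if d.contains new_vote then d.insert new_vote (d.getD new_vote 0 + p.2)
      else d.insert new_vote p.2)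
    (PySem.Dict.empty : PySem.Dict (List String) Int)).items

-- ===== PORT B =====
def filter_votes_alt (voting_profile : List (List String × Int)) (alternatives : List String) : List (List String × Int) :=
  let allowed := PySem.Set.ofList alternatives
  let pairs := voting_profile.map (fun p => (p.1.filter (fun v => PySem.Set.contains allowed v), p.2))
  let keys := pairs.foldl (fun ks p => if ks.contains p.1 then ks else ks ++ [p.1]) ([] : List (List String))
  keys.map (fun k => (k, ((pairs.filter (fun p => p.1 == k)).map (·.2)).sum))

-- ===== PRECONDITION & SPEC =====
def Spec_filter_votes (voting_profile : List (List String × Int)) (alternatives : List String) (out : List (List String × Int)) : Prop := out = filter_votes_alt voting_profile alternatives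
instance (voting_profile : List (List String × Int)) (alternatives : List String) (out : List (List String × Int)) : Decidable (Spec_filter_votes voting_profile alternatives out) := by unfold Spec_filter_votes; infer_instance

-- ===== CLAIM (what is proved, stated in full; the proofs are below) =====
def Claim_equal_filter_votes : Prop := ∀ (voting_profile : List (List String × Int)) (alternatives : List String), Dom_filter_votes voting_profile alternatives → Spec_filter_votes voting_profile alternatives (filter_votes voting_profile alternatives)

-- ===== LEMMAS AND PROOFS =====

-- the uniform aggregation step both sides reduce to
def pvStep (d : PySem.Dict (List String) Int) (p : List String × Int) : PySem.Dict (List String) Int :=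
  d.insert p.1 (d.getD p.1 0 + p.2)

lemma pvStepA_eq (d : PySem.Dict (List String) Int) (k : List String) (a : Int) :
    (if d.contains k then d.insert k (d.getD k 0 + a) else d.insert k a) = pvStep d (k, a) := by
  unfold pvStep
  by_cases h : d.contains k = true
  · simp [h]
  · simp [h, PySem.Dict.getD_of_not_contains d 0 (by simpa using h)]

lemma pvGetD_foldl (ps : List (List String × Int)) (d : PySem.Dict (List String) Int) (k : List String) :
    (ps.foldl pvStep d).getD k 0 = d.getD k 0 + ((ps.filter (fun p => p.1 == k)).map (·.2)).sum := by
  induction ps generalizing d with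
  | nil => simp
  | cons p ps ih =>
      simp only [List.foldl_cons, ih, List.filter_cons]
      rcases eq_or_ne p.1 k with h | h
      · simp [pvStep, h, PySem.Dict.getD_insert_self]
        ring
      · have hb : (p.1 == k) = false := by simpa using h
        simp [pvStep, PySem.Dict.getD_insert, hb, Ne.symm h]

-- ===== VERDICT =====
theorem filter_votes_spec : Claim_equal_filter_votes := by
  intro vp alts _
  unfold Spec_filter_votes filter_votes filter_votes_alt
  have hkey : ∀ vote : List String,
      vote.foldl (fun acc value => if alts.contains value then acc ++ [value] else acc) ([] : List String)
        = vote.filter (fun v => PySem.Set.contains (PySem.Set.ofList alts) v) := by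
    intro vote
    rw [PySem.List.foldl_append_if]
    simp only [List.nil_append, List.map_id']
    apply List.filter_congr
    intro v _
    simp [PySem.Set.contains_eq_listContains, PySem.Set.mem_ofList]
  set ps : List (List String × Int) :=
      vp.map (fun p => (p.1.filter (fun v => PySem.Set.contains (PySem.Set.ofList alts) v), p.2)) with hps
  have hA : vp.foldl (fun d p =>
      let new_vote := p.1.foldl (fun acc value => if alts.contains value then acc ++ [value] else acc) ([] : List String)
      if d.contains new_vote then d.insert new_vote (d.getD new_vote 0 + p.2)
      else d.insert new_vote p.2) (PySem.Dict.empty : PySem.Dict (List String) Int)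
      = ps.foldl pvStep PySem.Dict.empty := by
    rw [hps, List.foldl_map]
    congr 1
    funext d p
    show (if _ then _ else _) = _
    rw [hkey p.1]
    exact pvStepA_eq d _ p.2
  have hstep : pvStep = fun (d : PySem.Dict (List String) Int) (p : List String × Int) =>
      d.insert p.1 (d.getD p.1 0 + p.2) := rfl
  have hkeys : ps.foldl (fun ks p => if ks.contains p.1 then ks else ks ++ [p.1]) ([] : List (List String))
      = (ps.foldl pvStep (PySem.Dict.empty : PySem.Dict (List String) Int)).keys := by
    rw [hstep, PySem.Dict.keys_foldl_insert_key (key := fun p : List String × Int => p.1)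
      (f := fun d x => d.getD x.1 0 + x.2)]
    have he : (PySem.Dict.empty : PySem.Dict (List String) Int).keys = ([] : List (List String)) := by simp
    rw [he, PySem.Set.update_map_eq_foldl_add]
    rfl
  have hnd : (ps.foldl pvStep (PySem.Dict.empty : PySem.Dict (List String) Int)).keys.Nodup := by
    rw [hstep]
    exact PySem.Dict.nodup_keys_foldl_insert_key ps (fun p : List String × Int => p.1)
      (fun d x => d.getD x.1 0 + x.2) PySem.Dict.empty (by simp)
  rw [hA]
  dsimp only
  rw [PySem.Dict.items_eq_map_keys _ hnd 0, ← hkeys]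
  apply List.map_congr_left
  intro k _
  rw [pvGetD_foldl]
  simp [hps, PySem.Set.contains_eq_listContains, PySem.Set.mem_ofList]
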